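-- pv_equiv track=rewrite | github.com/Elkrisent/DocuMind | backend/chunking.py | _extract_slide_structure
-- ===== SOURCE A (Python) =====
-- def _extract_slide_structure(slide_text):
--     """
--     Extract title and body from a slide page
--     """
--
--     lines = slide_text.split("\n")
--
--     title = None
--     body_lines = []
--
--     for line in lines:
--
--         line = line.strip()
--
--         if not line:
--             continue
--
--         # first meaningful line becomes title
--         if title is None and len(line) < 120:
--             title = line
--             continue
--
--         body_lines.append(line)
--
--     body = "\n".join(body_lines)
--
--     return title, body
-- ===== SOURCE B (Python) =====
-- def _extract_slide_structure(slide_text):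
--     """
--     Extract title and body from a slide page
--     """
--
--     def split_at_title(ls):
--         # recursively split the lines at the first short meaningful line:
--         # returns (meaningful long lines before it, that line or None, raw lines after it)
--         if not ls:
--             return [], None, []
--         s = ls[0].strip()
--         if not s:
--             return split_at_title(ls[1:])
--         if len(s) < 120:
--             return [], s, ls[1:]
--         pre, title, rest = split_at_title(ls[1:])
--         return [s] + pre, title, rest
--
--     pre, title, rest = split_at_title(slide_text.split("\n"))
--     body = "\n".join(pre + [s for s in map(str.strip, rest) if s])
--     return title, body
-- ===== Notes on version B (the rewrite author's own statement) =====
-- stated objective: alternative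
-- what changed: Replaces A's stateful single scan (a title-is-None flag mutated inside one loop over all lines) by a recursive split: split_at_title recursively divides the lines into (long meaningful prefix, title, raw remainder) with no mutable state, and a separate filter pass cleans the remainder before joining.
import Mathlib
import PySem

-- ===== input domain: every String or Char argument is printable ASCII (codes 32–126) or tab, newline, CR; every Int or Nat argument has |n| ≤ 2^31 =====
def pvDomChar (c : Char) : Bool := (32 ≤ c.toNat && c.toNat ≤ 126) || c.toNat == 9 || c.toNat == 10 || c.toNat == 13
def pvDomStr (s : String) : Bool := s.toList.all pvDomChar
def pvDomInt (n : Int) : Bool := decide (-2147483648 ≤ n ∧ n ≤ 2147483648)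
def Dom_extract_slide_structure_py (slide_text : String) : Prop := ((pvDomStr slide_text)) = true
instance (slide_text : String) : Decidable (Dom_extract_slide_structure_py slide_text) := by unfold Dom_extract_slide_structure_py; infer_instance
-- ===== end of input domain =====

-- B replaces A's stateful scan (title flag mutated in one loop) by a recursive split at the
-- first short meaningful line plus a separate filter pass; same cost ("alternative").

-- ===== PORT A =====
-- s.split("\n") (non-empty separator): PySem.Chars.splitOn lifted to String
def pvSplitNL (s : String) : List String :=
  (PySem.Chars.splitOn s.toList "\n".toList).map String.ofList
-- step of A's for-loop: strip, skip empties, first short line becomes title, rest goes to body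
def pvStepA (st : Option String × List String) (line : String) : Option String × List String :=
  let s := PySem.Str.strip line
  if s = "" then st
  else if st.1 = none ∧ PySem.Str.len s < 120 then (some s, st.2)
  else (st.1, st.2 ++ [s])

def extract_slide_structure_py (slide_text : String) : Option String × String :=
  let lines := pvSplitNL slide_text
  let st := lines.foldl pvStepA (none, [])
  (st.1, PySem.Str.join "\n" st.2)

-- ===== PORT B =====
-- the stripped non-empty lines of ls (Source B's '[s for s in map(str.strip, rest) if s]')
def pvMeaningful (ls : List String) : List String :=
  (ls.map PySem.Str.strip).filter (fun s => s ≠ "")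

-- Source B's split_at_title: (meaningful long prefix, title or none, raw lines after the title)
def pvSplitAtTitle : List String → List String × Option String × List String
  | [] => ([], none, [])
  | l :: ls =>
    let s := PySem.Str.strip l
    if s = "" then pvSplitAtTitle ls
    else if PySem.Str.len s < 120 then ([], some s, ls)
    else
      let r := pvSplitAtTitle ls
      (s :: r.1, r.2.1, r.2.2)

def extract_slide_structure_py_alt (slide_text : String) : Option String × String :=
  let r := pvSplitAtTitle (pvSplitNL slide_text)
  (r.2.1, PySem.Str.join "\n" (r.1 ++ pvMeaningful r.2.2))

-- ===== PRECONDITION & SPEC =====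
def Spec_extract_slide_structure_py (slide_text : String) (out : Option String × String) : Prop := out = extract_slide_structure_py_alt slide_text
instance (slide_text : String) (out : Option String × String) : Decidable (Spec_extract_slide_structure_py slide_text out) := by unfold Spec_extract_slide_structure_py; infer_instance

-- ===== CLAIM (what is proved, stated in full; the proofs are below) =====
def Claim_equal_extract_slide_structure_py : Prop := ∀ (slide_text : String), Dom_extract_slide_structure_py slide_text → Spec_extract_slide_structure_py slide_text (extract_slide_structure_py slide_text)

-- ===== LEMMAS AND PROOFS =====

-- once the title is set, A's fold just appends every meaningful line
theorem foldA_some (lines : List String) (t : String) (acc : List String) :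
    lines.foldl pvStepA (some t, acc) = (some t, acc ++ pvMeaningful lines) := by
  induction lines generalizing acc with
  | nil => simp [pvMeaningful]
  | cons l ls ih =>
      by_cases h : PySem.Str.strip l = ""
      · simp [pvStepA, pvMeaningful, h, ih]
      · simp [pvStepA, pvMeaningful, h, ih]

-- A's fold from a title-less state, characterised by B's recursive split
theorem foldA_none (lines : List String) (acc : List String) :
    lines.foldl pvStepA (none, acc) =
      ((pvSplitAtTitle lines).2.1,
        acc ++ (pvSplitAtTitle lines).1 ++ pvMeaningful (pvSplitAtTitle lines).2.2) := by
  induction lines generalizing acc with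
  | nil => simp [pvSplitAtTitle, pvMeaningful]
  | cons l ls ih =>
      by_cases h : PySem.Str.strip l = ""
      · simp [pvStepA, pvSplitAtTitle, h, ih]
      · by_cases h2 : (PySem.Chars.strip l.toList).length < 120
        · simp [pvStepA, pvSplitAtTitle, h, h2, foldA_some]
        · simp [pvStepA, pvSplitAtTitle, h, h2, ih]

-- ===== VERDICT (by name: the statement is the Claim_ definition above) =====
theorem extract_slide_structure_py_spec : Claim_equal_extract_slide_structure_py := by
  intro slide_text _
  unfold Spec_extract_slide_structure_py extract_slide_structure_py extract_slide_structure_py_alt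
  simp [foldA_none]
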